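-- pv_equiv track=rewrite | github.com/wiesenthal/durakAI | AI.py | possible_defends
-- ===== SOURCE A (Python) =====
-- def possible_defends(attacking_cards, my_hand):
--     results = []
--     other = 0
--
--     for i in range(len(my_hand)):
--         if my_hand[i] > attacking_cards[other]:
--             temp_attacks = list(attacking_cards[:])
--             temp_attacks.pop(other)
--             temp_hand = my_hand[:]
--             c = temp_hand.pop(i)
--             if len(temp_hand) == 0 or len(temp_attacks) == 0:
--                 results += [[c]]
--             else:
--                 # else: still have more attacks to defend
--                 for a in possible_defends(temp_attacks, temp_hand):
--                     if a:
--                         results += [[c] + a]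
--     if not results:
--         return [[]]
--     else:
--         return results + [[]]
-- ===== SOURCE B (Python) =====
-- def possible_defends(attacking_cards, my_hand):
--     # Explicit-stack DFS instead of recursion; same pre-order of completed
--     # defense sequences, single trailing [] appended at the end.
--     results = []
--     stack = [(list(attacking_cards), list(my_hand), [])]
--     while stack:
--         attacks, hand, prefix = stack.pop()
--         if prefix and (not attacks or not hand):
--             results.append(prefix)
--             continue
--         children = []
--         seen = []
--         rest = hand
--         while rest:
--             c, rest = rest[0], rest[1:]
--             if c > attacks[0]:
--                 children.append((attacks[1:], seen + rest, prefix + [c]))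
--             seen = seen + [c]
--         stack.extend(reversed(children))
--     if results:
--         return results + [[]]
--     return [[]]
-- ===== Notes on version B (the rewrite author's own statement) =====
-- stated objective: alternative
-- what changed: Replaces A's recursion (which rebuilds, filters and re-concatenates each recursive result list per hand index) with an explicit worklist DFS: a stack of (attacks, hand, prefix) frames expanded in ascending order, emitting completed prefixes directly in the same pre-order.
import Mathlib
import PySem

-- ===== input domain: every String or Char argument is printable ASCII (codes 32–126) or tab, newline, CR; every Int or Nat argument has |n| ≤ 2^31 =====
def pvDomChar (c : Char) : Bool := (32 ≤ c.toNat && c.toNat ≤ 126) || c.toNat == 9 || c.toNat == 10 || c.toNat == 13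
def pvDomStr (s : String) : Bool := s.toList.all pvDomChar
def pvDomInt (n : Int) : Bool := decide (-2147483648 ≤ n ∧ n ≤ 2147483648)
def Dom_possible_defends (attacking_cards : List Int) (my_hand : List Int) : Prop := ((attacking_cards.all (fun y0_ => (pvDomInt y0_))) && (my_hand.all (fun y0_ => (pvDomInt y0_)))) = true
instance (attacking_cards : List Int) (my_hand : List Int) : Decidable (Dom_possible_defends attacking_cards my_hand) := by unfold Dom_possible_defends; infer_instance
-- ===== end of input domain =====

-- B replaces A's recursive enumeration by an explicit worklist DFS (alternative decomposition, same cost).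

-- ===== PORT A =====
-- The loop 'for i in range(len(my_hand))' as recursion on i; the recursive call
-- possible_defends(temp_attacks, temp_hand) is inlined (its body is exactly
-- 'let r := pdGoA …; if r = [] then [[]] else r ++ [[]]').
-- attacking_cards[0] raises IndexError when attacking_cards = [] (excluded by Pre_);
-- here (pyGet? … 0).getD 0 supplies a dummy value on that excluded input.
def pdGoA (attacks hand : List Int) (i : Nat) : List (List Int) :=
  if h : i < hand.length then
    (if hand[i] > (PySem.List.pyGet? attacks 0).getD 0 then
      let tA := attacks.drop 1                         -- copy of attacks with .pop(0)
      let tH := hand.take i ++ hand.drop (i + 1)       -- copy of hand with .pop(i); c = hand[i]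
      if tH = [] ∨ tA = [] then [[hand[i]]]
      else
        let r := pdGoA tA tH 0
        (if r = [] then [[]] else r ++ [[]]).flatMap
          (fun a => if a = [] then [] else [hand[i] :: a])   -- 'if a: results += [[c] + a]'
     else [])
    ++ pdGoA attacks hand (i + 1)
  else []
termination_by (hand.length, hand.length - i)
decreasing_by
  · apply Prod.Lex.left
    have : (hand.take i).length = i := List.length_take_of_le (by omega)
    simp [this, List.length_drop]; omega
  · apply Prod.Lex.right; omega

def possible_defends (attacking_cards : List Int) (my_hand : List Int) : List (List Int) :=
  let results := pdGoA attacking_cards my_hand 0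
  if results = [] then [[]] else results ++ [[]]

-- ===== PORT B =====
-- inner 'while rest' loop of Source B: collect the child frames in ascending order
def pdChildren (attacks pfx seen rest : List Int) :
    List (List Int × List Int × List Int) :=
  match rest with
  | [] => []
  | c :: rs =>
    (if c > (PySem.List.pyGet? attacks 0).getD 0 then
       [(attacks.drop 1, seen ++ rs, pfx ++ [c])] else [])
    ++ pdChildren attacks pfx (seen ++ [c]) rs

-- measure facts used for pdStack's termination
theorem pdChildren_measure_sum (attacks pfx : List Int) :
    ∀ (rest seen : List Int),
      ((pdChildren attacks pfx seen rest).map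
        (fun fr => (fr.2.1.length + 1).factorial)).sum
        ≤ rest.length * (seen.length + rest.length).factorial := by
  intro rest
  induction rest with
  | nil => intro seen; simp [pdChildren]
  | cons c rs ih =>
    intro seen
    have h2 := ih (seen ++ [c])
    simp only [pdChildren, List.map_append, List.sum_append]
    have hfac : (seen.length + (c :: rs).length).factorial
        = ((seen ++ [c]).length + rs.length).factorial := by
      simp; ring_nf
    by_cases hc : c > (PySem.List.pyGet? attacks 0).getD 0
    · simp only [if_pos hc]
      have : (seen ++ rs).length + 1 = seen.length + (c :: rs).length := by simp; omega
      simp only [List.map_cons, List.map_nil, List.sum_cons, List.sum_nil, this]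
      calc (seen.length + (c :: rs).length).factorial + 0 +
              ((pdChildren attacks pfx (seen ++ [c]) rs).map
                (fun fr => (fr.2.1.length + 1).factorial)).sum
          ≤ (seen.length + (c :: rs).length).factorial +
              rs.length * (seen.length + (c :: rs).length).factorial := by
            rw [hfac]; omega
        _ = (c :: rs).length * (seen.length + (c :: rs).length).factorial := by
            simp [Nat.succ_mul, Nat.add_comm]
      
    · simp only [if_neg hc]
      calc (([] : List (List Int × List Int × List Int)).map
              (fun fr => (fr.2.1.length + 1).factorial)).sum +
              ((pdChildren attacks pfx (seen ++ [c]) rs).map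
                (fun fr => (fr.2.1.length + 1).factorial)).sum
          ≤ 0 + rs.length * ((seen ++ [c]).length + rs.length).factorial := by
            simpa using h2
        _ ≤ (c :: rs).length * (seen.length + (c :: rs).length).factorial := by
            rw [← hfac]
            have : rs.length ≤ (c :: rs).length := by simp
            simpa using Nat.mul_le_mul_right _ this

-- the 'while stack' loop of Source B (top of the Python stack = head of this list)
def pdStack : List (List Int × List Int × List Int) → List (List Int) → List (List Int)
  | [], results => results
  | (attacks, hand, pfx) :: rest, results =>
    if pfx ≠ [] ∧ (attacks = [] ∨ hand = []) then
      pdStack rest (results ++ [pfx])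
    else
      pdStack (pdChildren attacks pfx [] hand ++ rest) results
termination_by stack => ((stack.map (fun fr => (fr.2.1.length + 1).factorial)).sum)
decreasing_by
  · have := Nat.factorial_pos (hand.length + 1); simp; omega
  · simp only [List.map_append, List.sum_append, List.map_cons, List.sum_cons]
    have h := pdChildren_measure_sum attacks pfx hand []
    simp only [List.length_nil, Nat.zero_add] at h
    have hlt : hand.length * hand.length.factorial < (hand.length + 1).factorial := by
      rw [Nat.factorial_succ]
      have := Nat.factorial_pos hand.length
      exact Nat.mul_lt_mul_of_lt_of_le (Nat.lt_succ_self _) (le_refl _) this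
    omega

def possible_defends_alt (attacking_cards : List Int) (my_hand : List Int) : List (List Int) :=
  let results := pdStack [(attacking_cards, my_hand, [])] []
  if results = [] then [[]] else results ++ [[]]

-- ===== PRECONDITION & SPEC =====
-- Pre_ excludes exactly the inputs where Python A raises IndexError
-- (attacking_cards empty while my_hand is not: 'attacking_cards[other]' with other = 0).
def Pre_possible_defends (attacking_cards : List Int) (my_hand : List Int) : Prop :=
  attacking_cards ≠ [] ∨ my_hand = []
instance (attacking_cards : List Int) (my_hand : List Int) : Decidable (Pre_possible_defends attacking_cards my_hand) := by unfold Pre_possible_defends; infer_instance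
def pvWitness_possible_defends : List Int × List Int := ([3, 5], [4, 6, 2])

def Spec_possible_defends (attacking_cards : List Int) (my_hand : List Int) (out : List (List Int)) : Prop := out = possible_defends_alt attacking_cards my_hand
instance (attacking_cards : List Int) (my_hand : List Int) (out : List (List Int)) : Decidable (Spec_possible_defends attacking_cards my_hand out) := by unfold Spec_possible_defends; infer_instance

-- ===== CLAIM (what is proved, stated in full; the proofs are below) =====
def Claim_equal_possible_defends : Prop := ∀ (attacking_cards : List Int) (my_hand : List Int), Dom_possible_defends attacking_cards my_hand → Pre_possible_defends attacking_cards my_hand → Spec_possible_defends attacking_cards my_hand (possible_defends attacking_cards my_hand)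

-- ===== LEMMAS AND PROOFS =====

theorem mem_pdChildren_len (attacks pfx : List Int) :
    ∀ (rest seen : List Int) fr, fr ∈ pdChildren attacks pfx seen rest →
      fr.2.1.length + 1 = seen.length + rest.length := by
  intro rest
  induction rest with
  | nil => intro seen fr hfr; simp [pdChildren] at hfr
  | cons c rs ih =>
    intro seen fr hfr
    simp only [pdChildren, List.mem_append] at hfr
    rcases hfr with hfr | hfr
    · split at hfr <;> simp_all
      omega
    · have := ih (seen ++ [c]) fr hfr; simp at this ⊢; omega

theorem flatMap_attach_eq {α β : Type} (l : List α) (f : α → List β) :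
    l.attach.flatMap (fun x => f x.1) = l.flatMap f := by
  induction l with
  | nil => simp
  | cons a as ih => simp [List.attach_cons, List.flatMap_map, ih]

-- the sequences the DFS emits from one frame, defined by recursion on the hand
def emitSeq : List Int × List Int × List Int → List (List Int)
  | (attacks, hand, pfx) =>
    if pfx ≠ [] ∧ (attacks = [] ∨ hand = []) then [pfx]
    else (pdChildren attacks pfx [] hand).attach.flatMap
      (fun fr => emitSeq fr.1)
termination_by fr => fr.2.1.length
decreasing_by
  have h := mem_pdChildren_len attacks pfx hand [] fr.1 fr.2
  simp at h; omega

theorem emitSeq_terminal (attacks hand pfx : List Int)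
    (h : pfx ≠ [] ∧ (attacks = [] ∨ hand = [])) :
    emitSeq (attacks, hand, pfx) = [pfx] := by
  rw [emitSeq]; simp [h]

theorem emitSeq_expand (attacks hand pfx : List Int)
    (h : ¬ (pfx ≠ [] ∧ (attacks = [] ∨ hand = []))) :
    emitSeq (attacks, hand, pfx)
      = (pdChildren attacks pfx [] hand).flatMap emitSeq := by
  rw [emitSeq, if_neg h, flatMap_attach_eq]

theorem pdStack_emits :
    ∀ (stack : List (List Int × List Int × List Int)) (results : List (List Int)),
      pdStack stack results = results ++ stack.flatMap emitSeq := by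
  intro stack results
  induction stack, results using pdStack.induct with
  | case1 results => simp [pdStack]
  | case2 attacks hand pfx rest results h ih =>
    rw [pdStack, if_pos h, ih, List.flatMap_cons, emitSeq_terminal attacks hand pfx h]
    simp
  | case3 attacks hand pfx rest results h ih =>
    rw [pdStack, if_neg h, ih, List.flatMap_append, List.flatMap_cons,
      ← emitSeq_expand attacks hand pfx h]

theorem pdGoA_ne_nil (attacks hand : List Int) (i : Nat) :
    ∀ x ∈ pdGoA attacks hand i, x ≠ [] := by
  induction attacks, hand, i using pdGoA.induct with
  | case1 attacks hand i hi ih1 ih2 =>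
    intro x hx
    rw [pdGoA, dif_pos hi] at hx
    rcases List.mem_append.1 hx with hx | hx
    · by_cases hc : hand[i] > (PySem.List.pyGet? attacks 0).getD 0
      · rw [if_pos hc] at hx
        by_cases hte : hand.take i ++ hand.drop (i + 1) = [] ∨ attacks.drop 1 = []
        · rw [if_pos hte] at hx; simp at hx; simp [hx]
        · rw [if_neg hte] at hx
          simp only [List.mem_flatMap] at hx
          obtain ⟨a, -, hx⟩ := hx
          split at hx <;> simp_all
      · rw [if_neg hc] at hx; simp at hx
    · exact ih2 x hx
  | case2 attacks hand i hi =>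
    intro x hx; rw [pdGoA, dif_neg hi] at hx; simp at hx

theorem flatMap_nonnil (c : Int) :
    ∀ (r : List (List Int)), (∀ x ∈ r, x ≠ []) →
      r.flatMap (fun a => if a = [] then ([] : List (List Int)) else [c :: a])
        = r.map (c :: ·)
  | [], _ => by simp
  | y :: ys, hr => by
    have hy : y ≠ [] := hr y (by simp)
    rw [List.flatMap_cons, List.map_cons, if_neg hy,
      flatMap_nonnil c ys (fun x hx => hr x (by simp [hx]))]
    rfl

theorem filter_trailing (r : List (List Int)) (c : Int)
    (hr : ∀ x ∈ r, x ≠ []) :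
    (if r = [] then [[]] else r ++ [[]]).flatMap
      (fun a => if a = [] then [] else [c :: a]) = r.map (c :: ·) := by
  by_cases h : r = []
  · simp [h]
  · rw [if_neg h, List.flatMap_append, flatMap_nonnil c r hr]; simp

-- KEY: the children of a frame, fully expanded, emit exactly A's inner loop
-- result (from index seen.length on), each sequence prefixed by pfx.
theorem children_emit :
    ∀ (n : Nat) (attacks pfx seen rest : List Int),
      seen.length + rest.length ≤ n →
      (pdChildren attacks pfx seen rest).flatMap emitSeq
        = (pdGoA attacks (seen ++ rest) seen.length).map (pfx ++ ·) := by
  intro n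
  induction n with
  | zero =>
    intro attacks pfx seen rest hle
    have h1 : rest = [] := by
      cases rest with
      | nil => rfl
      | cons c rs => simp at hle
    subst h1
    rw [pdGoA]
    simp [pdChildren]
  | succ n ihn =>
    intro attacks pfx seen rest hle
    induction rest generalizing seen with
    | nil =>
      rw [pdGoA]; simp [pdChildren]
    | cons c rs ihr =>
      have hi : seen.length < (seen ++ c :: rs).length := by simp
      have hget : (seen ++ c :: rs)[seen.length]'hi = c := by
        rw [List.getElem_append_right (Nat.le_refl _)]; simp
      have htake : (seen ++ c :: rs).take seen.length = seen := by
        simp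
      have hdrop : (seen ++ c :: rs).drop (seen.length + 1) = rs := by
        simp [List.drop_append]
      have htail : pdGoA attacks (seen ++ c :: rs) (seen.length + 1)
            = pdGoA attacks ((seen ++ [c]) ++ rs) (seen ++ [c]).length := by
        simp
      rw [pdGoA, dif_pos hi]
      simp only [hget, htake, hdrop]
      rw [htail]
      have hle' : (seen ++ [c]).length + rs.length ≤ n + 1 := by
        simp at hle ⊢; omega
      have htl := ihr (seen ++ [c]) hle'
      simp only [pdChildren, List.flatMap_append, List.map_append, htl]
      congr 1
      by_cases hc : c > (PySem.List.pyGet? attacks 0).getD 0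
      · rw [if_pos hc, if_pos hc]
        simp only [List.flatMap_cons, List.flatMap_nil, List.append_nil]
        by_cases hte : seen ++ rs = [] ∨ attacks.drop 1 = []
        · rw [if_pos hte, emitSeq_terminal _ _ _ ⟨by simp, by tauto⟩]
          simp
        · rw [if_neg hte, emitSeq_expand _ _ _ (by simp [not_or] at hte ⊢; tauto)]
          have hsub := ihn (attacks.drop 1) (pfx ++ [c]) [] (seen ++ rs)
            (by simp at hle ⊢; omega)
          simp only [List.length_nil, List.nil_append] at hsub
          rw [hsub, filter_trailing _ _ (pdGoA_ne_nil _ _ _), List.map_map]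
          apply List.map_congr_left
          intro x _
          simp
      · rw [if_neg hc, if_neg hc]; simp

-- ===== VERDICT (by name: the statement is the Claim_ definition above) =====
theorem possible_defends_spec : Claim_equal_possible_defends := by
  intro attacks hand _ _
  unfold Spec_possible_defends possible_defends possible_defends_alt
  have h1 : pdStack [(attacks, hand, [])] [] = emitSeq (attacks, hand, []) := by
    rw [pdStack_emits]; simp
  have h2 : emitSeq (attacks, hand, []) = pdGoA attacks hand 0 := by
    rw [emitSeq_expand attacks hand [] (by simp)]
    have := children_emit hand.length attacks [] [] hand (by simp)
    simpa using this
  rw [h1, h2]
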